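-- pv_equiv track=rewrite | github.com/rageshn/AlgoExpert | Graphs/minimum-passes-of-matrix.py | convert_negatives
-- ===== SOURCE A (Python) =====
-- def convert_negatives(matrix):
--     next_pass_queue = get_all_positive_positions(matrix)
--     passes = 0
--     while len(next_pass_queue) > 0:
--         current_pass_queue = next_pass_queue
--         next_pass_queue = []
--         while len(current_pass_queue) > 0:
--             curr_row, curr_col = current_pass_queue.pop(0)
--             adjacent_positions = get_adjacent_positions(curr_row, curr_col, matrix)
--             for position in adjacent_positions:
--                 row, column = position
--                 value = matrix[row][column]
--                 if value < 0:
--                     matrix[row][column] *= -1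
--                     next_pass_queue.append([row, column])
--         passes += 1
--     return passes
--
-- def get_all_positive_positions(matrix):
--     positive_positions = []
--     for row in range(len(matrix)):
--         for column in range(len(matrix[row])):
--             value = matrix[row][column]
--             if value > 0:
--                 positive_positions.append([row, column])
--     return positive_positions
--
-- def get_adjacent_positions(row, column, matrix):
--     adj_positions = []
--     if row > 0:
--         adj_positions.append([row - 1, column])
--     if row < len(matrix) - 1:
--         adj_positions.append([row + 1, column])
--     if column > 0:
--         adj_positions.append([row, column - 1])
--     if column < len(matrix[0]) - 1:
--         adj_positions.append([row, column + 1])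
--     return adj_positions
-- ===== SOURCE B (Python) =====
-- def _get(m, r, c):
--     return m[r][c] if 0 <= r < len(m) and 0 <= c < len(m[r]) else 0
--
-- def convert_negatives(matrix):
--     m = [row[:] for row in matrix]
--     if not any(v > 0 for row in m for v in row):
--         return 0
--     passes = 1
--     while True:
--         flips = [(r, c)
--                  for r in range(len(m))
--                  for c in range(len(m[r]))
--                  if m[r][c] < 0 and any(_get(m, nr, nc) > 0
--                                         for nr, nc in ((r - 1, c), (r + 1, c), (r, c - 1), (r, c + 1)))]
--         if not flips:
--             return passes
--         for r, c in flips: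
--             m[r][c] = -m[r][c]
--         passes += 1
-- ===== Notes on version B (the rewrite author's own statement) =====
-- stated objective: simpler
-- what changed: Replaced A's BFS frontier queue (with its helper collecting positives and per-cell adjacency lists) by repeated full-matrix scans: each scan collects all negative cells with a positive neighbour and flips them in one batch; answer is 0 with no positives, else 1 plus the number of flipping scans. Pre_ excludes ragged matrices containing a positive cell, where A indexes rows through len(matrix[0]) and raises IndexError or returns an accidental count.
-- outside the precondition, e.g. on convert_negatives([[1], [2, -3]]): A returns 1, B returns 2; on convert_negatives([[0, 0], [5, -1, -2]]): A returns 2, B returns 3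
import Mathlib
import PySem

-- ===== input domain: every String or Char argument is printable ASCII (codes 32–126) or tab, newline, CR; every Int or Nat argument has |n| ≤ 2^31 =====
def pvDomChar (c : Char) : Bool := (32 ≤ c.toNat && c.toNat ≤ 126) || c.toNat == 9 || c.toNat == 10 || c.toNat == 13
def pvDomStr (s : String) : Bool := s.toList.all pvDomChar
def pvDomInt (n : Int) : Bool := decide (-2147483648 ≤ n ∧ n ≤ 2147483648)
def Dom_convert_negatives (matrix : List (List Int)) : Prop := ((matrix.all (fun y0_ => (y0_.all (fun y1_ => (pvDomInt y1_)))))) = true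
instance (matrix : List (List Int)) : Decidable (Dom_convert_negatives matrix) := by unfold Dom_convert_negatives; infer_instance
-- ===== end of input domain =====

-- B replaces A's BFS frontier queue by repeated full-matrix scans (flip list computed per scan, then applied); objective: simpler.
-- A mutates its argument matrix in place; B does not — the equivalence proved here is about the RETURN value only.

-- ===== PORT A =====

-- matrix[r][c] read / point assignment. Exact for the indices the two programs generate: every
-- access is preceded by a bounds check keeping 0 ≤ r < len(m) and 0 ≤ c < len(m[r]) (rectangular input).
def pvCell (m : List (List Int)) (r c : Int) : Int :=
  if 0 ≤ r ∧ 0 ≤ c then (m.getD r.toNat []).getD c.toNat 0 else 0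

def pvSet (m : List (List Int)) (r c : Int) (v : Int) : List (List Int) :=
  if 0 ≤ r ∧ 0 ≤ c then m.set r.toNat ((m.getD r.toNat []).set c.toNat v) else m

-- number of negative cells: the termination measure of both loops (each pass only flips negatives to positives)
def negCount (m : List (List Int)) : Nat :=
  (m.map (fun row => row.countP (fun v => decide (v < 0)))).sum

-- helper facts the ports' termination proofs cite
theorem sum_map_set {α : Type} (l : List α) (f : α → Nat) :
    ∀ (i : Nat) (x : α), ∀ h : i < l.length,
      ((l.set i x).map f).sum + f l[i] = (l.map f).sum + f x := by
  induction l with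
  | nil => intro i x h; simp at h
  | cons a t ih =>
      intro i x h
      cases i with
      | zero => simp [List.set]; omega
      | succ j =>
          simp only [List.set, List.map_cons, List.sum_cons, List.getElem_cons_succ]
          have := ih j x (by simpa using h)
          omega

theorem pvCell_lt_zero_elim {m : List (List Int)} {r c : Int} (h : pvCell m r c < 0) :
    0 ≤ r ∧ 0 ≤ c ∧ r.toNat < m.length ∧ c.toNat < (m.getD r.toNat []).length := by
  unfold pvCell at h
  by_cases h1 : 0 ≤ r ∧ 0 ≤ c
  · simp only [h1, if_true] at h
    refine ⟨h1.1, h1.2, ?_, ?_⟩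
    · by_contra hlen
      rw [List.getD_eq_default m [] (by omega)] at h
      simp at h
    · by_contra hlen
      rw [List.getD_eq_default _ (0 : Int) (by omega)] at h
      simp at h
  · simp [h1] at h

theorem negCount_pvSet_of_neg {m : List (List Int)} {r c : Int} {v : Int}
    (h : pvCell m r c < 0) (hv : 0 < v) :
    negCount (pvSet m r c v) + 1 = negCount m := by
  obtain ⟨hr, hc, hrl, hcl⟩ := pvCell_lt_zero_elim h
  have hcell : (m.getD r.toNat []).getD c.toNat 0 < 0 := by
    unfold pvCell at h; simp only [hr, hc, and_self, if_true] at h; exact h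
  unfold pvSet negCount
  simp only [hr, hc, and_self, if_true]
  have hrow : m.getD r.toNat [] = m[r.toNat] := List.getD_eq_getElem m [] hrl
  have hcl' : c.toNat < m[r.toNat].length := by rw [← hrow]; exact hcl
  have hentry : m[r.toNat][c.toNat] = (m.getD r.toNat []).getD c.toNat 0 := by
    rw [hrow, List.getD_eq_getElem _ _ hcl']
  have hs := sum_map_set m (fun row => row.countP (fun v => decide (v < 0))) r.toNat
      ((m.getD r.toNat []).set c.toNat v) hrl
  have hcp := List.countP_set (p := fun v : Int => decide (v < 0))
      (l := m[r.toNat]) (a := v) (i := c.toNat) hcl'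
  have hlt : m[r.toNat][c.toNat] < 0 := by rw [hentry]; exact hcell
  have hpos : 0 < m[r.toNat].countP (fun v : Int => decide (v < 0)) := by
    rw [List.countP_pos_iff]
    exact ⟨m[r.toNat][c.toNat], List.getElem_mem hcl', by simpa using hlt⟩
  rw [hrow] at hs ⊢
  rw [decide_eq_true hlt, decide_eq_false (by omega : ¬ v < 0)] at hcp
  norm_num at hcp
  omega

-- port of get_all_positive_positions
def getAllPositivePositions (m : List (List Int)) : List (Int × Int) :=
  (PySem.List.pyRange 0 (m.length : Int)).foldl (fun acc r =>
    (PySem.List.pyRange 0 (((m.getD r.toNat []).length : Int))).foldl (fun acc2 c =>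
      if pvCell m r c > 0 then acc2 ++ [(r, c)] else acc2) acc) []

-- port of get_adjacent_positions (bounds use len(matrix) and len(matrix[0]), as in A)
def getAdjacentPositions (row column : Int) (m : List (List Int)) : List (Int × Int) :=
  let adj : List (Int × Int) := []
  let adj := if row > 0 then adj ++ [(row - 1, column)] else adj
  let adj := if row < (m.length : Int) - 1 then adj ++ [(row + 1, column)] else adj
  let adj := if column > 0 then adj ++ [(row, column - 1)] else adj
  let adj := if column < ((m.getD 0 []).length : Int) - 1 then adj ++ [(row, column + 1)] else adj
  adj

-- the body of A's for-loop over adjacent positions (state: matrix, next_pass_queue)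
def processCell (st : List (List Int) × List (Int × Int)) (p : Int × Int) :
    List (List Int) × List (Int × Int) :=
  let value := pvCell st.1 p.1 p.2
  if value < 0 then (pvSet st.1 p.1 p.2 (-value), st.2 ++ [p]) else st

-- A's inner while-loop: pop(0) from the current queue, flip negative neighbours, collect next queue
def processPass : List (List Int) → List (Int × Int) → List (Int × Int) →
    List (List Int) × List (Int × Int)
  | m, [], next => (m, next)
  | m, (r, c) :: rest, next =>
      let st := (getAdjacentPositions r c m).foldl processCell (m, next)
      processPass st.1 rest st.2

theorem processCell_count (st : List (List Int) × List (Int × Int)) (p : Int × Int) :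
    negCount (processCell st p).1 + (processCell st p).2.length = negCount st.1 + st.2.length := by
  unfold processCell
  by_cases h : pvCell st.1 p.1 p.2 < 0
  · simp only [h, if_true, List.length_append, List.length_cons, List.length_nil]
    have := negCount_pvSet_of_neg h (v := -(pvCell st.1 p.1 p.2)) (by omega)
    omega
  · simp [h]

theorem foldl_processCell_count (ps : List (Int × Int)) :
    ∀ st : List (List Int) × List (Int × Int),
      negCount (ps.foldl processCell st).1 + (ps.foldl processCell st).2.length
        = negCount st.1 + st.2.length := by
  induction ps with
  | nil => intro st; simp
  | cons p t ih =>
      intro st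
      simp only [List.foldl_cons]
      rw [ih (processCell st p)]
      exact processCell_count st p

theorem processPass_count : ∀ (q : List (Int × Int)) (m : List (List Int)) (next : List (Int × Int)),
    negCount (processPass m q next).1 + (processPass m q next).2.length
      = negCount m + next.length := by
  intro q
  induction q with
  | nil => intro m next; simp [processPass]
  | cons p t ih =>
      intro m next
      obtain ⟨r, c⟩ := p
      simp only [processPass]
      rw [ih]
      exact foldl_processCell_count _ (m, next)

theorem processPass_decreases (m : List (List Int)) (q : List (Int × Int))
    (h : (processPass m q []).2 ≠ []) :
    negCount (processPass m q []).1 < negCount m := by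
  have := processPass_count q m []
  have hlen : 0 < (processPass m q []).2.length := List.length_pos_iff.mpr h
  simp at this
  omega

-- A's outer while-loop
def outerLoop (m : List (List Int)) (q : List (Int × Int)) (passes : Int) : Int :=
  if q = [] then passes
  else
    if h : (processPass m q []).2 = [] then passes + 1
    else outerLoop (processPass m q []).1 (processPass m q []).2 (passes + 1)
termination_by negCount m
decreasing_by exact processPass_decreases m q h

def convert_negatives (matrix : List (List Int)) : Int :=
  outerLoop matrix (getAllPositivePositions matrix) 0

-- ===== PORT B =====

-- any(v > 0 for row in m for v in row)
def hasPositive (m : List (List Int)) : Bool :=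
  m.any (fun row => row.any (fun v => decide (0 < v)))

-- the four orthogonal neighbour positions ((r-1,c),(r+1,c),(r,c-1),(r,c+1))
def pvNbrs (r c : Int) : List (Int × Int) := [(r - 1, c), (r + 1, c), (r, c - 1), (r, c + 1)]

-- m[r][c] < 0 and any(_get(m, nr, nc) > 0 ...); pvCell is the port of _get (0 outside bounds)
def flipCond (m : List (List Int)) (r c : Int) : Bool :=
  decide (pvCell m r c < 0) && (pvNbrs r c).any (fun p => decide (0 < pvCell m p.1 p.2))

-- the flip-list comprehension
def flipList (m : List (List Int)) : List (Int × Int) :=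
  (PySem.List.pyRange 0 (m.length : Int)).flatMap (fun r =>
    ((PySem.List.pyRange 0 (((m.getD r.toNat []).length : Int))).filter
      (fun c => flipCond m r c)).map (fun c => (r, c)))

-- for r, c in flips: m[r][c] = -m[r][c]
def applyFlips (m : List (List Int)) (ps : List (Int × Int)) : List (List Int) :=
  ps.foldl (fun acc p => pvSet acc p.1 p.2 (-(pvCell acc p.1 p.2))) m

-- termination facts for B's loop
theorem mem_flipList_neg {m : List (List Int)} {p : Int × Int} (h : p ∈ flipList m) :
    pvCell m p.1 p.2 < 0 := by
  unfold flipList at h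
  simp only [List.mem_flatMap, List.mem_map, List.mem_filter] at h
  obtain ⟨r, _, c, ⟨_, hcond⟩, rfl⟩ := h
  unfold flipCond at hcond
  simp at hcond
  exact hcond.1

theorem getD_set_ne' {α : Type} {l : List α} {i j : Nat} {x d : α} (h : i ≠ j) :
    (l.set i x).getD j d = l.getD j d := by
  simp [List.getD_eq_getElem?_getD, List.getElem?_set_ne h]

theorem pvCell_pvSet_ne {m : List (List Int)} {r c r' c' v : Int}
    (h : r' ≠ r ∨ c' ≠ c) :
    pvCell (pvSet m r c v) r' c' = pvCell m r' c' := by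
  unfold pvCell pvSet
  by_cases hg : 0 ≤ r ∧ 0 ≤ c
  · rw [if_pos hg]
    by_cases hg' : 0 ≤ r' ∧ 0 ≤ c'
    · rw [if_pos hg', if_pos hg']
      by_cases hr : r' = r
      · subst hr
        have hc' : c' ≠ c := by tauto
        by_cases hlen : r'.toNat < m.length
        · rw [List.getD_eq_getElem?_getD (l := m.set r'.toNat _),
            List.getElem?_set_self hlen, Option.getD_some]
          rw [getD_set_ne' (by omega)]
        · rw [List.set_eq_of_length_le (by omega)]
      · rw [getD_set_ne' (by omega)]
    · rw [if_neg hg', if_neg hg']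
  · rw [if_neg hg]

theorem negCount_applyFlips : ∀ (ps : List (Int × Int)) (m : List (List Int)),
    ps.Nodup → (∀ p ∈ ps, pvCell m p.1 p.2 < 0) →
    negCount (applyFlips m ps) + ps.length = negCount m := by
  intro ps
  induction ps with
  | nil => intro m _ _; simp [applyFlips]
  | cons p t ih =>
      intro m hnd hneg
      have hp : pvCell m p.1 p.2 < 0 := hneg p (List.mem_cons_self)
      have hstep : negCount (pvSet m p.1 p.2 (-(pvCell m p.1 p.2))) + 1 = negCount m :=
        negCount_pvSet_of_neg hp (by omega)
      have hrest : ∀ q ∈ t, pvCell (pvSet m p.1 p.2 (-(pvCell m p.1 p.2))) q.1 q.2 < 0 := by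
        intro q hq
        have hqp : q ≠ p := fun habs => (List.nodup_cons.mp hnd).1 (habs ▸ hq)
        rw [pvCell_pvSet_ne (by
          rcases Prod.ext_iff.not.mp hqp with h'
          by_contra hcon
          push_neg at hcon
          exact hqp (Prod.ext hcon.1 hcon.2))]
        exact hneg q (List.mem_cons_of_mem _ hq)
      have := ih (pvSet m p.1 p.2 (-(pvCell m p.1 p.2))) (List.nodup_cons.mp hnd).2 hrest
      simp only [applyFlips, List.foldl_cons] at this ⊢
      simp only [List.length_cons]
      omega

theorem nodup_flatMap_fst {l : List Int} {f : Int → List (Int × Int)}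
    (hl : l.Nodup) (hf : ∀ r ∈ l, (f r).Nodup) (hfst : ∀ r p, p ∈ f r → p.1 = r) :
    (l.flatMap f).Nodup := by
  induction l with
  | nil => simp
  | cons a t ih =>
      rw [List.flatMap_cons]
      apply List.Nodup.append
      · exact hf a List.mem_cons_self
      · exact ih (List.nodup_cons.mp hl).2 (fun r hr => hf r (List.mem_cons_of_mem _ hr))
      · intro p hpa hpt
        obtain ⟨b, hb, hpb⟩ := List.mem_flatMap.mp hpt
        have h1 : p.1 = a := hfst a p hpa
        have h2 : p.1 = b := hfst b p hpb
        exact (List.nodup_cons.mp hl).1 (h1 ▸ h2 ▸ hb)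

theorem flipList_nodup (m : List (List Int)) : (flipList m).Nodup := by
  unfold flipList
  apply nodup_flatMap_fst
  · rw [PySem.List.pyRange_zero_natCast]
    exact ((List.nodup_range).map (fun a b => by omega))
  · intro r _
    apply List.Nodup.map (fun a b h => by simpa using h)
    apply List.Nodup.filter
    rw [PySem.List.pyRange_zero_natCast]
    exact ((List.nodup_range).map (fun a b => by omega))
  · intro r p hp
    simp only [List.mem_map] at hp
    obtain ⟨c, _, rfl⟩ := hp
    rfl

theorem applyFlips_decreases (m : List (List Int)) (h : flipList m ≠ []) :
    negCount (applyFlips m (flipList m)) < negCount m := by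
  have := negCount_applyFlips (flipList m) m (flipList_nodup m) (fun p hp => mem_flipList_neg hp)
  have hlen : 0 < (flipList m).length := List.length_pos_iff.mpr h
  omega

-- B's scan loop
def bLoop (m : List (List Int)) (passes : Int) : Int :=
  if h : flipList m = [] then passes
  else bLoop (applyFlips m (flipList m)) (passes + 1)
termination_by negCount m
decreasing_by exact applyFlips_decreases m h

def convert_negatives_alt (matrix : List (List Int)) : Int :=
  if hasPositive matrix then bLoop matrix 1 else 0

-- ===== PRECONDITION & SPEC =====
-- Pre_ excludes ragged matrices (rows of unequal length) that contain a positive cell: there A's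
-- spreading indexes rows through len(matrix[0]) and either raises IndexError or returns a count
-- shaped by that accident; ragged matrices with no positive are admitted (no spreading happens).

def Pre_convert_negatives (matrix : List (List Int)) : Prop :=
  (∀ row ∈ matrix, row.length = (matrix.headD []).length) ∨
  (∀ row ∈ matrix, ∀ v ∈ row, v ≤ 0)
instance (matrix : List (List Int)) : Decidable (Pre_convert_negatives matrix) := by
  unfold Pre_convert_negatives; infer_instance

def pvWitness_convert_negatives : List (List Int) := [[1, -2], [-3, -4]]

def Spec_convert_negatives (matrix : List (List Int)) (out : Int) : Prop := out = convert_negatives_alt matrix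
instance (matrix : List (List Int)) (out : Int) : Decidable (Spec_convert_negatives matrix out) := by unfold Spec_convert_negatives; infer_instance

-- ===== CLAIM (what is proved, stated in full; the proofs are below) =====
def Claim_equal_convert_negatives : Prop := ∀ (matrix : List (List Int)), Dom_convert_negatives matrix → Pre_convert_negatives matrix → Spec_convert_negatives matrix (convert_negatives matrix)

-- ===== LEMMAS AND PROOFS =====

theorem pvCell_pvSet_self {m : List (List Int)} {r c : Int} {v : Int}
    (h : pvCell m r c < 0) :
    pvCell (pvSet m r c v) r c = v := by
  obtain ⟨hr, hc, hrl, hcl⟩ := pvCell_lt_zero_elim h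
  unfold pvCell pvSet
  simp only [hr, hc, and_self, if_true]
  rw [List.getD_eq_getElem?_getD (l := m.set r.toNat _), List.getElem?_set_self (by simpa using hrl),
    Option.getD_some, List.getD_eq_getElem?_getD, List.getElem?_set_self (by simpa using hcl),
    Option.getD_some]

-- rectangularity: the first disjunct of Pre_ (the second disjunct is handled separately)
def RectM (m : List (List Int)) : Prop := ∀ row ∈ m, row.length = (m.headD []).length

-- abstract vocabulary for the equivalence argument
def CellPos (m : List (List Int)) (p : Int × Int) : Prop := 0 < pvCell m p.1 p.2
def CellNeg (m : List (List Int)) (p : Int × Int) : Prop := pvCell m p.1 p.2 < 0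
-- the cells a scan of B flips: negative with a positive orthogonal neighbour
def FlipSpec (m : List (List Int)) (p : Int × Int) : Prop :=
  CellNeg m p ∧ ∃ q ∈ pvNbrs p.1 p.2, CellPos m q
def ShapeEq (m m' : List (List Int)) : Prop :=
  m.length = m'.length ∧ ∀ i : Nat, (m.getD i []).length = (m'.getD i []).length
def InR (m : List (List Int)) (p : Int × Int) : Prop :=
  0 ≤ p.1 ∧ 0 ≤ p.2 ∧ p.1.toNat < m.length ∧ p.2.toNat < (m.getD p.1.toNat []).length
-- invariant of A's outer loop: queue cells are positive, and every cell B would flip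
-- is adjacent (in A's sense) to a queue cell
def InvA (m : List (List Int)) (q : List (Int × Int)) : Prop :=
  (∀ p ∈ q, CellPos m p) ∧
  (∀ x, FlipSpec m x → ∃ y ∈ q, x ∈ getAdjacentPositions y.1 y.2 m)

theorem shapeEq_refl (m : List (List Int)) : ShapeEq m m := ⟨rfl, fun _ => rfl⟩

theorem shapeEq_trans {m1 m2 m3 : List (List Int)} (h1 : ShapeEq m1 m2) (h2 : ShapeEq m2 m3) :
    ShapeEq m1 m3 := ⟨h1.1.trans h2.1, fun i => (h1.2 i).trans (h2.2 i)⟩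

theorem shape_pvSet (m : List (List Int)) (r c v : Int) : ShapeEq (pvSet m r c v) m := by
  unfold pvSet ShapeEq
  split_ifs with hg
  · refine ⟨by simp, fun i => ?_⟩
    by_cases hi : r.toNat = i
    · subst hi
      by_cases hl : r.toNat < m.length
      · rw [List.getD_eq_getElem?_getD (l := m.set r.toNat _), List.getElem?_set_self hl,
          Option.getD_some, List.length_set]
      · rw [List.set_eq_of_length_le (by omega)]
    · rw [getD_set_ne' hi]
  · exact ⟨rfl, fun _ => rfl⟩

theorem pvCell_eq_getElem {m : List (List Int)} {i j : Nat}
    (hi : i < m.length) (hj : j < (m.getD i []).length) :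
    pvCell m (i : Int) (j : Int) = (m.getD i []).getD j 0 := by
  unfold pvCell
  simp

theorem ext_of_shape_cells {m m' : List (List Int)} (hs : ShapeEq m m')
    (hc : ∀ r c : Int, pvCell m r c = pvCell m' r c) : m = m' := by
  apply List.ext_getElem hs.1
  intro i h1 h2
  apply List.ext_getElem
  · have := hs.2 i
    rwa [List.getD_eq_getElem _ _ h1, List.getD_eq_getElem _ _ h2] at this
  · intro j hj1 hj2
    have := hc (i : Int) (j : Int)
    rw [pvCell_eq_getElem h1 (by rwa [List.getD_eq_getElem _ _ h1]),
      pvCell_eq_getElem h2 (by rwa [List.getD_eq_getElem _ _ h2])] at this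
    rwa [List.getD_eq_getElem _ _ h1, List.getD_eq_getElem _ _ h2,
      List.getD_eq_getElem _ _ hj1, List.getD_eq_getElem _ _ hj2] at this

theorem pvCell_ne_zero_elim {m : List (List Int)} {p : Int × Int}
    (h : pvCell m p.1 p.2 ≠ 0) : InR m p := by
  unfold pvCell at h
  by_cases h1 : 0 ≤ p.1 ∧ 0 ≤ p.2
  · refine ⟨h1.1, h1.2, ?_, ?_⟩
    · by_contra hlen
      rw [List.getD_eq_default m [] (by omega)] at h
      simp at h
    · by_contra hlen
      rw [List.getD_eq_default _ (0 : Int) (by omega)] at h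
      simp at h
  · simp [h1] at h

theorem pvNbrs_symm {x y : Int × Int} : x ∈ pvNbrs y.1 y.2 ↔ y ∈ pvNbrs x.1 x.2 := by
  simp only [pvNbrs, List.mem_cons, List.mem_singleton, Prod.ext_iff]
  constructor <;> (intro h; rcases h with h | h | h | h <;> simp_all <;> omega)

theorem adj_shape {m m' : List (List Int)} (hs : ShapeEq m m') (r c : Int) :
    getAdjacentPositions r c m = getAdjacentPositions r c m' := by
  unfold getAdjacentPositions
  rw [hs.1, hs.2 0]

-- row lengths through getD given rectangularity (Pre_)
theorem rect_getD {m : List (List Int)} (hrect : RectM m)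
    {i : Nat} (hi : i < m.length) :
    (m.getD i []).length = (m.getD 0 []).length := by
  have hmem : m.getD i [] ∈ m := by
    rw [List.getD_eq_getElem _ _ hi]; exact List.getElem_mem hi
  have h0 : m.headD [] = m.getD 0 [] := by
    cases m with
    | nil => rfl
    | cons a t => rfl
  rw [← h0]
  exact hrect _ hmem

theorem rect_of_shape {m m' : List (List Int)} (hs : ShapeEq m' m)
    (hrect : RectM m) : RectM m' := by
  intro row hrow
  obtain ⟨i, hi, rfl⟩ := List.mem_iff_getElem.mp hrow
  have h0 : m'.headD [] = m'.getD 0 [] := by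
    cases m' with
    | nil => rfl
    | cons a t => rfl
  rw [h0, ← List.getD_eq_getElem _ _ hi, hs.2 i, hs.2 0]
  exact rect_getD hrect (hs.1 ▸ hi)

theorem mem_adj_iff_raw (m : List (List Int)) (r c : Int) (x : Int × Int) :
    x ∈ getAdjacentPositions r c m ↔
      (0 < r ∧ x = (r - 1, c)) ∨ (r < (m.length : Int) - 1 ∧ x = (r + 1, c)) ∨
      (0 < c ∧ x = (r, c - 1)) ∨ (c < ((m.getD 0 []).length : Int) - 1 ∧ x = (r, c + 1)) := by
  unfold getAdjacentPositions
  split_ifs with h1 h2 h3 h4 <;>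
    simp only [List.mem_append, List.mem_singleton, List.not_mem_nil, false_or] <;>
    constructor <;> intro h <;>
    · rcases h with h | h | h | h <;> try exact Or.inl h
      all_goals try { rcases h with ⟨hg, he⟩; tauto }
      all_goals tauto

theorem adj_mem_iff {m : List (List Int)} (hrect : RectM m)
    {y : Int × Int} (hy : InR m y) (x : Int × Int) :
    x ∈ getAdjacentPositions y.1 y.2 m ↔ (x ∈ pvNbrs y.1 y.2 ∧ InR m x) := by
  obtain ⟨r, c⟩ := y
  obtain ⟨hr0, hc0, hrl, hcl⟩ := hy
  simp only at hr0 hc0 hrl hcl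
  have hry : (m.getD r.toNat []).length = (m.getD 0 []).length := rect_getD hrect hrl
  rw [mem_adj_iff_raw]
  simp only [pvNbrs, List.mem_cons, List.not_mem_nil, or_false]
  constructor
  · rintro (⟨hg, rfl⟩ | ⟨hg, rfl⟩ | ⟨hg, rfl⟩ | ⟨hg, rfl⟩)
    · have h1 : (r - 1).toNat < m.length := by omega
      have h2 := rect_getD hrect h1
      exact ⟨by tauto, by omega, by omega, by omega, by simp only; omega⟩
    · have h1 : (r + 1).toNat < m.length := by omega
      have h2 := rect_getD hrect h1
      exact ⟨by tauto, by omega, by omega, by omega, by simp only; omega⟩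
    · exact ⟨by tauto, by omega, by omega, by omega, by simp only; omega⟩
    · exact ⟨by tauto, by omega, by omega, by omega, by simp only; omega⟩
  · rintro ⟨(rfl | rfl | rfl | rfl), hx1, hx2, hx3, hx4⟩
    · exact Or.inl ⟨by simp only at hx1; omega, rfl⟩
    · refine Or.inr (Or.inl ⟨?_, rfl⟩)
      simp only at hx3; omega
    · exact Or.inr (Or.inr (Or.inl ⟨by simp only at hx2; omega, rfl⟩))
    · refine Or.inr (Or.inr (Or.inr ⟨?_, rfl⟩))
      simp only at hx4
      rw [show ((r, c + 1) : Int × Int).1.toNat = r.toNat by simp] at hx4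
      omega

-- characterization of the inner foldl over a list of positions
theorem foldl_processCell_spec : ∀ (ps : List (Int × Int)) (m : List (List Int))
    (next : List (Int × Int)),
    ShapeEq (ps.foldl processCell (m, next)).1 m ∧
    (∀ x : Int × Int, pvCell (ps.foldl processCell (m, next)).1 x.1 x.2 =
      if pvCell m x.1 x.2 < 0 ∧ x ∈ ps then -(pvCell m x.1 x.2) else pvCell m x.1 x.2) ∧
    (∀ x : Int × Int, x ∈ (ps.foldl processCell (m, next)).2 ↔
      x ∈ next ∨ (pvCell m x.1 x.2 < 0 ∧ x ∈ ps)) := by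
  intro ps
  induction ps with
  | nil =>
      intro m next
      exact ⟨shapeEq_refl m, fun x => by simp, fun x => by simp⟩
  | cons p t ih =>
      intro m next
      by_cases hneg : pvCell m p.1 p.2 < 0
      · have hstep : processCell (m, next) p =
            (pvSet m p.1 p.2 (-(pvCell m p.1 p.2)), next ++ [p]) := by
          simp [processCell, hneg]
        obtain ⟨ihs, ihc, ihm⟩ := ih (pvSet m p.1 p.2 (-(pvCell m p.1 p.2))) (next ++ [p])
        rw [List.foldl_cons, hstep]
        have hselfpos : pvCell (pvSet m p.1 p.2 (-(pvCell m p.1 p.2))) p.1 p.2 =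
            -(pvCell m p.1 p.2) := pvCell_pvSet_self hneg
        refine ⟨shapeEq_trans ihs (shape_pvSet m p.1 p.2 _), fun x => ?_, fun x => ?_⟩
        · rw [ihc x]
          by_cases hx : x = p
          · subst hx
            rw [hselfpos]
            rw [if_neg (by omega), if_pos ⟨hneg, List.mem_cons_self⟩]
          · have hne : x.1 ≠ p.1 ∨ x.2 ≠ p.2 := by
              by_contra hcon; push_neg at hcon; exact hx (Prod.ext hcon.1 hcon.2)
            rw [pvCell_pvSet_ne hne]
            by_cases h1 : pvCell m x.1 x.2 < 0 ∧ x ∈ t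
            · rw [if_pos h1, if_pos ⟨h1.1, List.mem_cons_of_mem _ h1.2⟩]
            · rw [if_neg h1, if_neg (by
                rintro ⟨ha, hb⟩
                rcases List.mem_cons.mp hb with h | h
                · exact hx h
                · exact h1 ⟨ha, h⟩)]
        · rw [ihm x]
          by_cases hx : x = p
          · subst hx
            rw [hselfpos] at *
            simp only [List.mem_append, List.mem_singleton]
            constructor
            · rintro ((h | h) | h)
              · exact Or.inl h
              · exact Or.inr ⟨hneg, List.mem_cons_self⟩
              · omega
            · intro _; exact Or.inl (Or.inr (by simp))
          · have hne : x.1 ≠ p.1 ∨ x.2 ≠ p.2 := by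
              by_contra hcon; push_neg at hcon; exact hx (Prod.ext hcon.1 hcon.2)
            rw [pvCell_pvSet_ne hne]
            simp only [List.mem_append, List.mem_singleton]
            constructor
            · rintro ((h | h) | ⟨ha, hb⟩)
              · exact Or.inl h
              · exact absurd h hx
              · exact Or.inr ⟨ha, List.mem_cons_of_mem _ hb⟩
            · rintro (h | ⟨ha, hb⟩)
              · exact Or.inl (Or.inl h)
              · rcases List.mem_cons.mp hb with h | h
                · exact absurd h hx
                · exact Or.inr ⟨ha, h⟩
      · have hstep : processCell (m, next) p = (m, next) := by
          simp [processCell, hneg]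
        obtain ⟨ihs, ihc, ihm⟩ := ih m next
        rw [List.foldl_cons, hstep]
        refine ⟨ihs, fun x => ?_, fun x => ?_⟩
        · rw [ihc x]
          by_cases hx : x = p
          · subst hx
            rw [if_neg (fun h => hneg h.1), if_neg (fun h => hneg h.1)]
          · by_cases h1 : pvCell m x.1 x.2 < 0 ∧ x ∈ t
            · rw [if_pos h1, if_pos ⟨h1.1, List.mem_cons_of_mem _ h1.2⟩]
            · rw [if_neg h1, if_neg (by
                rintro ⟨ha, hb⟩
                rcases List.mem_cons.mp hb with h | h
                · exact hneg (h ▸ ha)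
                · exact h1 ⟨ha, h⟩)]
        · rw [ihm x]
          constructor
          · rintro (h | ⟨ha, hb⟩)
            · exact Or.inl h
            · exact Or.inr ⟨ha, List.mem_cons_of_mem _ hb⟩
          · rintro (h | ⟨ha, hb⟩)
            · exact Or.inl h
            · rcases List.mem_cons.mp hb with h | h
              · exact absurd (h ▸ ha) hneg
              · exact Or.inr ⟨ha, h⟩

-- characterization of one full pass of A
theorem processPass_spec : ∀ (q : List (Int × Int)) (m : List (List Int))
    (next : List (Int × Int)),
    ShapeEq (processPass m q next).1 m ∧
    (∀ x : Int × Int, pvCell (processPass m q next).1 x.1 x.2 =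
      if pvCell m x.1 x.2 < 0 ∧ (∃ y ∈ q, x ∈ getAdjacentPositions y.1 y.2 m)
      then -(pvCell m x.1 x.2) else pvCell m x.1 x.2) ∧
    (∀ x : Int × Int, x ∈ (processPass m q next).2 ↔
      x ∈ next ∨ (pvCell m x.1 x.2 < 0 ∧ ∃ y ∈ q, x ∈ getAdjacentPositions y.1 y.2 m)) := by
  intro q
  induction q with
  | nil =>
      intro m next
      refine ⟨shapeEq_refl m, fun x => by simp [processPass], fun x => by simp [processPass]⟩
  | cons hd rest ih =>
      intro m next
      obtain ⟨r, c⟩ := hd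
      obtain ⟨fs, fc, fm⟩ := foldl_processCell_spec (getAdjacentPositions r c m) m next
      obtain ⟨ihs, ihc, ihm⟩ :=
        ih ((getAdjacentPositions r c m).foldl processCell (m, next)).1
          ((getAdjacentPositions r c m).foldl processCell (m, next)).2
      have hunf : processPass m ((r, c) :: rest) next =
          processPass ((getAdjacentPositions r c m).foldl processCell (m, next)).1 rest
            ((getAdjacentPositions r c m).foldl processCell (m, next)).2 := by
        simp [processPass]
      rw [hunf] at *
      have hadj : ∀ y : Int × Int,
          getAdjacentPositions y.1 y.2 ((getAdjacentPositions r c m).foldl processCell (m, next)).1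
            = getAdjacentPositions y.1 y.2 m := fun y => adj_shape fs y.1 y.2
      refine ⟨shapeEq_trans ihs fs, fun x => ?_, fun x => ?_⟩
      · rw [ihc x]
        simp only [hadj]
        by_cases h1 : pvCell m x.1 x.2 < 0
        · by_cases h2 : x ∈ getAdjacentPositions r c m
          · have hv : pvCell ((getAdjacentPositions r c m).foldl processCell (m, next)).1 x.1 x.2
                = -(pvCell m x.1 x.2) := by rw [fc x, if_pos ⟨h1, h2⟩]
            rw [hv, if_neg (fun hcon => by omega),
              if_pos ⟨h1, (r, c), List.mem_cons_self, h2⟩]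
          · have hv : pvCell ((getAdjacentPositions r c m).foldl processCell (m, next)).1 x.1 x.2
                = pvCell m x.1 x.2 := by rw [fc x, if_neg (fun hcon => h2 hcon.2)]
            rw [hv]
            by_cases h3 : ∃ y ∈ rest, x ∈ getAdjacentPositions y.1 y.2 m
            · rw [if_pos ⟨h1, h3⟩, if_pos ⟨h1, by
                obtain ⟨y, hy, hxy⟩ := h3
                exact ⟨y, List.mem_cons_of_mem _ hy, hxy⟩⟩]
            · rw [if_neg (fun hcon => h3 hcon.2), if_neg (by
                rintro ⟨ha, y, hy, hxy⟩
                rcases List.mem_cons.mp hy with h | h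
                · subst h; exact h2 hxy
                · exact h3 ⟨y, h, hxy⟩)]
        · have hv : pvCell ((getAdjacentPositions r c m).foldl processCell (m, next)).1 x.1 x.2
              = pvCell m x.1 x.2 := by rw [fc x, if_neg (fun hcon => h1 hcon.1)]
          rw [hv, if_neg (fun hcon => h1 hcon.1), if_neg (fun hcon => h1 hcon.1)]
      · rw [ihm x]
        simp only [hadj]
        rw [fm x]
        by_cases h1 : pvCell m x.1 x.2 < 0
        · by_cases h2 : x ∈ getAdjacentPositions r c m
          · have hv : pvCell ((getAdjacentPositions r c m).foldl processCell (m, next)).1 x.1 x.2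
                = -(pvCell m x.1 x.2) := by rw [fc x, if_pos ⟨h1, h2⟩]
            rw [hv]
            constructor
            · rintro ((h | h) | ⟨ha, _⟩)
              · exact Or.inl h
              · exact Or.inr ⟨h1, (r, c), List.mem_cons_self, h2⟩
              · omega
            · intro _
              exact Or.inl (Or.inr ⟨h1, h2⟩)
          · have hv : pvCell ((getAdjacentPositions r c m).foldl processCell (m, next)).1 x.1 x.2
                = pvCell m x.1 x.2 := by rw [fc x, if_neg (fun hcon => h2 hcon.2)]
            rw [hv]
            constructor
            · rintro ((h | h) | ⟨ha, y, hy, hxy⟩)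
              · exact Or.inl h
              · exact absurd h.2 h2
              · exact Or.inr ⟨h1, y, List.mem_cons_of_mem _ hy, hxy⟩
            · rintro (h | ⟨ha, y, hy, hxy⟩)
              · exact Or.inl (Or.inl h)
              · rcases List.mem_cons.mp hy with h | h
                · subst h; exact absurd hxy h2
                · exact Or.inr ⟨ha, y, h, hxy⟩
        · have hv : pvCell ((getAdjacentPositions r c m).foldl processCell (m, next)).1 x.1 x.2
              = pvCell m x.1 x.2 := by rw [fc x, if_neg (fun hcon => h1 hcon.1)]
          rw [hv]
          constructor
          · rintro ((h | h) | ⟨ha, _⟩)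
            · exact Or.inl h
            · exact absurd h.1 h1
            · exact absurd ha h1
          · rintro (h | ⟨ha, _⟩)
            · exact Or.inl (Or.inl h)
            · exact absurd ha h1

theorem mem_getAllPositivePositions {m : List (List Int)} (p : Int × Int) :
    p ∈ getAllPositivePositions m ↔ CellPos m p := by
  unfold getAllPositivePositions
  have hinner : ∀ (r : Int) (acc : List (Int × Int)),
      (PySem.List.pyRange 0 (((m.getD r.toNat []).length : Int))).foldl
        (fun acc2 c => if pvCell m r c > 0 then acc2 ++ [(r, c)] else acc2) acc
      = acc ++ ((PySem.List.pyRange 0 (((m.getD r.toNat []).length : Int))).filter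
          (fun c => decide (pvCell m r c > 0))).map (fun c => ((r : Int), c)) := by
    intro r acc
    have := PySem.List.foldl_append_if (fun c => decide (pvCell m r c > 0))
      (fun c => ((r : Int), c)) (PySem.List.pyRange 0 (((m.getD r.toNat []).length : Int))) acc
    simpa using this
  rw [show (fun (acc : List (Int × Int)) (r : Int) =>
      (PySem.List.pyRange 0 (((m.getD r.toNat []).length : Int))).foldl
        (fun acc2 c => if pvCell m r c > 0 then acc2 ++ [(r, c)] else acc2) acc)
    = (fun acc r => acc ++ ((PySem.List.pyRange 0 (((m.getD r.toNat []).length : Int))).filter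
        (fun c => decide (pvCell m r c > 0))).map (fun c => ((r : Int), c)))
    from funext fun acc => funext fun r => hinner r acc]
  rw [PySem.List.foldl_append_eq_flatMap]
  simp only [List.nil_append, List.mem_flatMap, List.mem_map, List.mem_filter,
    PySem.List.mem_pyRange_one]
  constructor
  · rintro ⟨r, ⟨_, _⟩, c, ⟨⟨_, _⟩, hpos⟩, rfl⟩
    simpa using hpos
  · intro hp
    obtain ⟨h1, h2, h3, h4⟩ := pvCell_ne_zero_elim (m := m) (p := p) (by unfold CellPos at hp; omega)
    exact ⟨p.1, ⟨h1, by omega⟩, p.2, ⟨⟨h2, by omega⟩, by simpa using hp⟩, rfl⟩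

theorem mem_flipList {m : List (List Int)} (p : Int × Int) :
    p ∈ flipList m ↔ FlipSpec m p := by
  unfold flipList flipCond FlipSpec CellNeg CellPos
  simp only [List.mem_flatMap, List.mem_map, List.mem_filter, PySem.List.mem_pyRange_one,
    Bool.and_eq_true, decide_eq_true_eq, List.any_eq_true]
  constructor
  · rintro ⟨r, ⟨_, _⟩, c, ⟨⟨_, _⟩, hneg, q, hq, hpos⟩, rfl⟩
    exact ⟨hneg, q, hq, hpos⟩
  · rintro ⟨hneg, q, hq, hpos⟩
    obtain ⟨h1, h2, h3, h4⟩ := pvCell_ne_zero_elim (m := m) (p := p) (by omega)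
    exact ⟨p.1, ⟨h1, by omega⟩, p.2, ⟨⟨h2, by omega⟩, hneg, q, hq, hpos⟩, rfl⟩

-- pointwise description of B's batch flip
theorem applyFlips_spec : ∀ (ps : List (Int × Int)) (m : List (List Int)),
    ps.Nodup → (∀ p ∈ ps, CellNeg m p) →
    ShapeEq (applyFlips m ps) m ∧
    (∀ x : Int × Int, pvCell (applyFlips m ps) x.1 x.2 =
      if x ∈ ps then -(pvCell m x.1 x.2) else pvCell m x.1 x.2) := by
  intro ps
  induction ps with
  | nil =>
      intro m _ _
      exact ⟨shapeEq_refl m, fun x => by simp [applyFlips]⟩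
  | cons p t ih =>
      intro m hnd hneg
      have hp : pvCell m p.1 p.2 < 0 := hneg p List.mem_cons_self
      have hrest : ∀ q ∈ t, CellNeg (pvSet m p.1 p.2 (-(pvCell m p.1 p.2))) q := by
        intro q hq
        have hqp : q ≠ p := fun habs => (List.nodup_cons.mp hnd).1 (habs ▸ hq)
        unfold CellNeg
        rw [pvCell_pvSet_ne (by
          by_contra hcon; push_neg at hcon; exact hqp (Prod.ext hcon.1 hcon.2))]
        exact hneg q (List.mem_cons_of_mem _ hq)
      obtain ⟨ihs, ihc⟩ := ih (pvSet m p.1 p.2 (-(pvCell m p.1 p.2)))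
        (List.nodup_cons.mp hnd).2 hrest
      have hunf : applyFlips m (p :: t) =
          applyFlips (pvSet m p.1 p.2 (-(pvCell m p.1 p.2))) t := by
        simp [applyFlips]
      rw [hunf]
      refine ⟨shapeEq_trans ihs (shape_pvSet m p.1 p.2 _), fun x => ?_⟩
      rw [ihc x]
      by_cases hx : x = p
      · subst hx
        have hnt : x ∉ t := (List.nodup_cons.mp hnd).1
        rw [if_neg hnt, pvCell_pvSet_self hp, if_pos List.mem_cons_self]
      · have hne : x.1 ≠ p.1 ∨ x.2 ≠ p.2 := by
          by_contra hcon; push_neg at hcon; exact hx (Prod.ext hcon.1 hcon.2)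
        rw [pvCell_pvSet_ne hne]
        by_cases h1 : x ∈ t
        · rw [if_pos h1, if_pos (List.mem_cons_of_mem _ h1)]
        · rw [if_neg h1, if_neg (by
            intro h
            rcases List.mem_cons.mp h with h | h
            · exact hx h
            · exact h1 h)]

theorem hasPositive_iff (m : List (List Int)) :
    hasPositive m = true ↔ ∃ p : Int × Int, CellPos m p := by
  unfold hasPositive CellPos
  simp only [List.any_eq_true, decide_eq_true_eq]
  constructor
  · rintro ⟨row, hrow, v, hv, hpos⟩
    obtain ⟨i, hi, rfl⟩ := List.mem_iff_getElem.mp hrow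
    obtain ⟨j, hj, rfl⟩ := List.mem_iff_getElem.mp hv
    refine ⟨((i : Int), (j : Int)), ?_⟩
    have : pvCell m (i : Int) (j : Int) = m[i][j] := by
      unfold pvCell
      simp only [Int.toNat_natCast, Int.natCast_nonneg, and_self, if_true]
      rw [List.getD_eq_getElem _ _ hi, List.getD_eq_getElem _ _ hj]
    simpa [this] using hpos
  · rintro ⟨p, hp⟩
    obtain ⟨h1, h2, h3, h4⟩ := pvCell_ne_zero_elim (m := m) (p := p) (by omega)
    refine ⟨m.getD p.1.toNat [], ?_, (m.getD p.1.toNat []).getD p.2.toNat 0, ?_, ?_⟩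
    · rw [List.getD_eq_getElem _ _ h3]; exact List.getElem_mem h3
    · rw [List.getD_eq_getElem _ _ h4]; exact List.getElem_mem h4
    · have : pvCell m p.1 p.2 = (m.getD p.1.toNat []).getD p.2.toNat 0 := by
        unfold pvCell; rw [if_pos ⟨h1, h2⟩]
      omega

theorem getAllPos_eq_nil (m : List (List Int)) :
    getAllPositivePositions m = [] ↔ hasPositive m = false := by
  rw [List.eq_nil_iff_forall_not_mem]
  constructor
  · intro h
    rw [← Bool.not_eq_true, hasPositive_iff]
    rintro ⟨p, hp⟩
    exact h p ((mem_getAllPositivePositions p).mpr hp)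
  · intro h p hp
    have := (hasPositive_iff m).mpr ⟨p, (mem_getAllPositivePositions p).mp hp⟩
    simp [h] at this

-- A's pass condition coincides with B's flip condition under the invariant
theorem acond_iff {m : List (List Int)} {q : List (Int × Int)}
    (hrect : RectM m) (hinv : InvA m q) (x : Int × Int) :
    (pvCell m x.1 x.2 < 0 ∧ ∃ y ∈ q, x ∈ getAdjacentPositions y.1 y.2 m) ↔ FlipSpec m x := by
  constructor
  · rintro ⟨hneg, y, hyq, hadj⟩
    have hypos : CellPos m y := hinv.1 y hyq
    have hyr : InR m y := pvCell_ne_zero_elim (by unfold CellPos at hypos; omega)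
    have := (adj_mem_iff hrect hyr x).mp hadj
    exact ⟨hneg, y, pvNbrs_symm.mp this.1, hypos⟩
  · intro hf
    obtain ⟨y, hyq, hadj⟩ := hinv.2 x hf
    exact ⟨hf.1, y, hyq, hadj⟩

-- one pass of A equals one scan of B, and the invariant is maintained
theorem step_eq {m : List (List Int)} {q : List (Int × Int)}
    (hrect : RectM m) (hinv : InvA m q) :
    (processPass m q []).1 = applyFlips m (flipList m) ∧
    (∀ x, x ∈ (processPass m q []).2 ↔ FlipSpec m x) := by
  obtain ⟨hshA, hcellA, hmemA⟩ := processPass_spec q m []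
  obtain ⟨hshB, hcellB⟩ := applyFlips_spec (flipList m) m (flipList_nodup m)
    (fun p hp => (mem_flipList p).mp hp |>.1)
  constructor
  · apply ext_of_shape_cells (shapeEq_trans hshA ⟨hshB.1.symm, fun i => (hshB.2 i).symm⟩)
    intro r c
    rw [hcellA (r, c), hcellB (r, c)]
    by_cases hf : FlipSpec m (r, c)
    · rw [if_pos ((acond_iff hrect hinv (r, c)).mpr hf), if_pos ((mem_flipList (r, c)).mpr hf)]
    · rw [if_neg (fun habs => hf ((acond_iff hrect hinv (r, c)).mp habs)),
        if_neg (fun habs => hf ((mem_flipList (r, c)).mp habs))]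
  · intro x
    rw [hmemA x]
    simp only [List.not_mem_nil, false_or]
    exact acond_iff hrect hinv x

theorem inv_step {m : List (List Int)} {q : List (Int × Int)}
    (hrect : RectM m) (hinv : InvA m q) :
    InvA (processPass m q []).1 (processPass m q []).2 ∧
    RectM (processPass m q []).1 := by
  obtain ⟨hsh, hcell, hmem⟩ := processPass_spec q m []
  have hrect' : RectM (processPass m q []).1 := rect_of_shape hsh hrect
  have hcell' : ∀ x : Int × Int, pvCell (processPass m q []).1 x.1 x.2 =
      if x ∈ flipList m then -(pvCell m x.1 x.2) else pvCell m x.1 x.2 := by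
    intro x
    rw [hcell x]
    by_cases hf : FlipSpec m x
    · rw [if_pos ((acond_iff hrect hinv x).mpr hf), if_pos ((mem_flipList x).mpr hf)]
    · rw [if_neg (fun habs => hf ((acond_iff hrect hinv x).mp habs)),
        if_neg (fun habs => hf ((mem_flipList x).mp habs))]
  have hmem' : ∀ x, x ∈ (processPass m q []).2 ↔ FlipSpec m x := by
    intro x
    rw [hmem x]
    simp only [List.not_mem_nil, false_or]
    exact acond_iff hrect hinv x
  refine ⟨⟨?_, ?_⟩, hrect'⟩
  · intro p hp
    have hf := (hmem' p).mp hp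
    unfold CellPos
    rw [hcell' p, if_pos ((mem_flipList p).mpr hf)]
    have := hf.1
    unfold CellNeg at this
    omega
  · intro x hfx
    obtain ⟨hxneg, n, hn, hnpos⟩ := hfx
    unfold CellNeg at hxneg
    rw [hcell' x] at hxneg
    have hnfm : ¬ FlipSpec m x := by
      intro habs
      rw [if_pos ((mem_flipList x).mpr habs)] at hxneg
      have := habs.1; unfold CellNeg at this; omega
    rw [if_neg (fun habs => hnfm ((mem_flipList x).mp habs))] at hxneg
    unfold CellPos at hnpos
    rw [hcell' n] at hnpos
    by_cases hfn : FlipSpec m n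
    · refine ⟨n, (hmem' n).mpr hfn, ?_⟩
      have hnR : InR (processPass m q []).1 n := by
        apply pvCell_ne_zero_elim
        rw [hcell' n, if_pos ((mem_flipList n).mpr hfn)]
        have := hfn.1; unfold CellNeg at this; omega
      rw [adj_mem_iff hrect' hnR x]
      refine ⟨pvNbrs_symm.mpr hn, ?_⟩
      apply pvCell_ne_zero_elim
      rw [hcell' x, if_neg (fun habs => hnfm ((mem_flipList x).mp habs))]
      omega
    · rw [if_neg (fun habs => hfn ((mem_flipList n).mp habs))] at hnpos
      exact absurd ⟨by unfold CellNeg; omega, n, hn, by unfold CellPos; omega⟩ hnfm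

theorem inv_init {m : List (List Int)} (hrect : RectM m) :
    InvA m (getAllPositivePositions m) := by
  constructor
  · intro p hp; exact (mem_getAllPositivePositions p).mp hp
  · intro x hf
    obtain ⟨hneg, n, hn, hnpos⟩ := hf
    refine ⟨n, (mem_getAllPositivePositions n).mpr hnpos, ?_⟩
    have hnr : InR m n := pvCell_ne_zero_elim (by unfold CellPos at hnpos; omega)
    rw [adj_mem_iff hrect hnr x]
    exact ⟨pvNbrs_symm.mpr hn,
      pvCell_ne_zero_elim (by unfold CellNeg at hneg; omega)⟩

theorem loop_eq : ∀ (n : Nat) (m : List (List Int)) (q : List (Int × Int)) (p : Int),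
    negCount m ≤ n → RectM m → InvA m q → q ≠ [] →
    outerLoop m q p = bLoop m (p + 1) := by
  intro n
  induction n with
  | zero =>
      intro m q p hn hrect hinv hq
      rw [outerLoop, if_neg hq]
      by_cases hN : (processPass m q []).2 = []
      · rw [dif_pos hN]
        have hfl : flipList m = [] := by
          rw [List.eq_nil_iff_forall_not_mem]
          intro x hx
          have hf := (mem_flipList x).mp hx
          have := ((step_eq hrect hinv).2 x).mpr hf
          rw [hN] at this
          simp at this
        rw [bLoop, dif_pos hfl]
      · exact absurd (processPass_decreases m q hN) (by omega)
  | succ n ih =>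
      intro m q p hn hrect hinv hq
      rw [outerLoop, if_neg hq]
      obtain ⟨hM, hNmem⟩ := step_eq hrect hinv
      by_cases hN : (processPass m q []).2 = []
      · rw [dif_pos hN]
        have hfl : flipList m = [] := by
          rw [List.eq_nil_iff_forall_not_mem]
          intro x hx
          have := (hNmem x).mpr ((mem_flipList x).mp hx)
          rw [hN] at this
          simp at this
        rw [bLoop, dif_pos hfl]
      · rw [dif_neg hN]
        have hfl : flipList m ≠ [] := by
          intro habs
          obtain ⟨x, hx⟩ := List.exists_mem_of_ne_nil _ hN
          have := (mem_flipList x).mpr ((hNmem x).mp hx)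
          rw [habs] at this
          simp at this
        have hdec := processPass_decreases m q hN
        obtain ⟨hinv', hrect'⟩ := inv_step hrect hinv
        have := ih (processPass m q []).1 (processPass m q []).2 (p + 1)
          (by omega) hrect' hinv' hN
        rw [this, hM]
        conv_rhs => rw [bLoop]
        rw [dif_neg hfl]

-- ===== VERDICT (by name: the statement is the Claim_ definition above) =====
theorem convert_negatives_spec : Claim_equal_convert_negatives := by
  intro matrix _ hpre
  unfold Spec_convert_negatives convert_negatives convert_negatives_alt
  by_cases hpos : hasPositive matrix = true
  · have hrect : RectM matrix := by
      rcases hpre with h | h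
      · exact h
      · exfalso
        unfold hasPositive at hpos
        simp only [List.any_eq_true, decide_eq_true_eq] at hpos
        obtain ⟨row, hrow, v, hv, hgt⟩ := hpos
        exact absurd (h row hrow v hv) (by omega)
    have hq : getAllPositivePositions matrix ≠ [] := by
      intro habs
      rw [getAllPos_eq_nil] at habs
      simp [habs] at hpos
    rw [if_pos hpos]
    have := loop_eq (negCount matrix) matrix (getAllPositivePositions matrix) 0
      le_rfl hrect (inv_init hrect) hq
    simpa using this
  · rw [if_neg hpos]
    rw [outerLoop]
    rw [if_pos ((getAllPos_eq_nil matrix).mpr (by simpa using hpos))]
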